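-- pv_equiv track=rewrite | github.com/maneloy/hello-world | ClassProjects/AlgoyProg1/P2-SandpileFractals/Algo1TP2.py | auxiliar
-- ===== SOURCE A (Python) =====
-- def auxiliar(lista, ancho, rv):
--     """Función auxiliar que modifica la lista de valores del tablero usada en la función 'escribir_archivo'.
-- 	Modifica la lista de valores de tal forma que se respete la resolución vertical especificada por el usuario. Recibe la lista de valores (cada uno representando una posición),
--         el ancho del tablero y la resolución vertical, y modifica la lista de manera acorde."""
--     nueva_lista = []
--     aux = []
--     cont = 0
--     for elemento in lista:
--         cont += 1
--         aux.append(elemento)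
--         if cont == ancho:
--             nueva_lista += aux * rv
--             aux = []
--             cont = 0
--     return nueva_lista
-- ===== SOURCE B (Python) =====
-- def auxiliar(lista, ancho, rv):
--     if ancho <= 0:
--         return []
--     nueva_lista = []
--     for i in range(len(lista) // ancho):
--         nueva_lista += lista[i * ancho:(i + 1) * ancho] * rv
--     return nueva_lista
-- ===== Notes on version B (the rewrite author's own statement) =====
-- stated objective: simpler
-- what changed: Replaces the element-by-element counter/accumulator scan with index arithmetic: iterate over complete-row indices and slice each row directly, repeating it rv times; the degenerate ancho<=0 case is an explicit early return.
import Mathlib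
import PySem

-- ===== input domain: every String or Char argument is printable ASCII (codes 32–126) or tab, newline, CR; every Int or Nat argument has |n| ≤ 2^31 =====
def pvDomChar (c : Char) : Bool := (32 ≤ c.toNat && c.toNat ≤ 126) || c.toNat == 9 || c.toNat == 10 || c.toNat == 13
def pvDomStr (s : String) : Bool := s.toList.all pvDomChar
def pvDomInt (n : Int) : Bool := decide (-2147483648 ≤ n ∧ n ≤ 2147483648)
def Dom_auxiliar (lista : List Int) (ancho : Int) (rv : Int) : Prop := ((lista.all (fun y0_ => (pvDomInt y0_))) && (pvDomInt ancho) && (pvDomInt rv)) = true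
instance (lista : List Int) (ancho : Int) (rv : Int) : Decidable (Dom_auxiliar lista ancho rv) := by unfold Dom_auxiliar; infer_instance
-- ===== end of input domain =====

-- B replaces A's element-by-element counter/accumulator scan with index arithmetic
-- over complete-row slices (objective: simpler); same return value on every input.

-- ===== PORT A =====
-- one loop step of A: cont += 1; aux.append(e); if cont == ancho: emit aux*rv, reset
def stepA (ancho rv : Int) (s : List Int × List Int × Int) (elemento : Int) :
    List Int × List Int × Int :=
  let cont := s.2.2 + 1
  let aux := s.2.1 ++ [elemento]
  if cont == ancho then (s.1 ++ PySem.List.pyRepeat aux rv, [], 0)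
  else (s.1, aux, cont)

def auxiliar (lista : List Int) (ancho : Int) (rv : Int) : List Int :=
  (lista.foldl (stepA ancho rv) ([], [], 0)).1

-- ===== PORT B =====
def auxiliar_alt (lista : List Int) (ancho : Int) (rv : Int) : List Int :=
  if ancho ≤ 0 then []
  else
    (List.range ((lista.length : Nat) / ancho.toNat)).foldl
      (fun (nueva : List Int) (i : Nat) =>
        nueva ++ PySem.List.pyRepeat
          (PySem.List.slice lista (some ((i : Int) * ancho)) (some (((i : Int) + 1) * ancho))) rv)
      []

-- ===== PRECONDITION & SPEC =====
def Spec_auxiliar (lista : List Int) (ancho : Int) (rv : Int) (out : List Int) : Prop := out = auxiliar_alt lista ancho rv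
instance (lista : List Int) (ancho : Int) (rv : Int) (out : List Int) : Decidable (Spec_auxiliar lista ancho rv out) := by unfold Spec_auxiliar; infer_instance

-- ===== CLAIM (what is proved, stated in full; the proofs are below) =====
def Claim_equal_auxiliar : Prop := ∀ (lista : List Int) (ancho : Int) (rv : Int), Dom_auxiliar lista ancho rv → Spec_auxiliar lista ancho rv (auxiliar lista ancho rv)

-- ===== LEMMAS AND PROOFS =====

-- the list of complete rows of width w (w > 0), front to back
def rowsChunks (w : Nat) (xs : List Int) : List (List Int) :=
  if hc : 0 < w ∧ w ≤ xs.length then xs.take w :: rowsChunks w (xs.drop w) else []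
termination_by xs.length
decreasing_by
  simp only [List.length_drop]; omega

-- A with ancho ≤ 0 never emits: cont stays ≥ 0, cont + 1 ≥ 1 > ancho
theorem foldA_noemit (ancho rv : Int) (h : ancho ≤ 0) :
    ∀ (lista : List Int) (acc aux : List Int) (cont : Int), 0 ≤ cont →
      (lista.foldl (stepA ancho rv) (acc, aux, cont)).1 = acc := by
  intro lista
  induction lista with
  | nil => intro acc aux cont _; simp
  | cons e t ih =>
    intro acc aux cont hc
    have hne : ¬ (cont + 1 == ancho) = true := by
      simp only [beq_iff_eq]; omega
    simp only [List.foldl_cons, stepA, hne]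
    exact ih acc (aux ++ [e]) (cont + 1) (by omega)

-- A's loop invariant for ancho > 0: starting with a partial row aux (cont = |aux|),
-- the emitted output is acc ++ the repeated complete rows of aux ++ rest
theorem foldA_inv (ancho rv : Int) (hpos : 0 < ancho) :
    ∀ (lista : List Int) (acc aux : List Int),
      (aux.length : Int) < ancho →
      (lista.foldl (stepA ancho rv) (acc, aux, (aux.length : Int))).1
        = acc ++ (rowsChunks ancho.toNat (aux ++ lista)).flatMap
            (fun r => PySem.List.pyRepeat r rv) := by
  intro lista
  induction lista with
  | nil =>
    intro acc aux hlt
    have hlt' : aux.length < ancho.toNat := by omega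
    rw [rowsChunks]
    simp
    omega
  | cons e t ih =>
    intro acc aux hlt
    by_cases h : (aux.length : Int) + 1 = ancho
    · have hb : ((aux.length : Int) + 1 == ancho) = true := by simp [h]
      simp only [List.foldl_cons, stepA]
      rw [if_pos hb]
      have := ih (acc ++ PySem.List.pyRepeat (aux ++ [e]) rv) [] (by simpa using hpos)
      simp only [List.length_nil, Nat.cast_zero] at this
      rw [this]
      have hlen : (aux ++ [e]).length = ancho.toNat := by simp; omega
      have hc : 0 < ancho.toNat ∧ ancho.toNat ≤ ((aux ++ [e]) ++ t).length := by
        constructor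
        · omega
        · simp at hlen ⊢; omega
      have hrow : rowsChunks ancho.toNat ((aux ++ [e]) ++ t)
          = (aux ++ [e]) :: rowsChunks ancho.toNat t := by
        rw [rowsChunks, dif_pos hc, List.take_left' hlen, List.drop_left' hlen]
      rw [show aux ++ e :: t = (aux ++ [e]) ++ t by simp, hrow]
      simp
    · have hb : ¬ ((aux.length : Int) + 1 == ancho) = true := by simp [h]
      simp only [List.foldl_cons, stepA]
      rw [if_neg hb]
      have hlen : ((aux ++ [e]).length : Int) = (aux.length : Int) + 1 := by simp
      have := ih acc (aux ++ [e]) (by rw [hlen]; omega)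
      rw [hlen] at this
      rw [this, show aux ++ e :: t = (aux ++ [e]) ++ t by simp]

-- rowsChunks as a map over row indices
theorem rowsChunks_eq_map (w : Nat) (hw : 0 < w) :
    ∀ (xs : List Int),
      rowsChunks w xs
        = (List.range (xs.length / w)).map (fun i => (xs.drop (i * w)).take w) := by
  intro xs
  induction hn : xs.length using Nat.strong_induction_on generalizing xs with
  | _ n ih =>
    subst hn
    by_cases h : w ≤ xs.length
    · rw [rowsChunks, dif_pos ⟨hw, h⟩]
      have hdiv : xs.length / w = (xs.length - w) / w + 1 := by
        rw [Nat.div_eq_sub_div hw h]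
      have hdl : (xs.drop w).length = xs.length - w := by simp
      have hrec := ih (xs.drop w).length (by simp; omega) (xs.drop w) rfl
      rw [hrec, hdiv, hdl, List.range_succ_eq_map]
      simp only [List.map_cons, List.map_map]
      congr 1
      · simp
      · apply List.map_congr_left
        intro i _
        simp only [Function.comp, Nat.succ_eq_add_one]
        rw [List.drop_drop, show w + i * w = (i + 1) * w by ring]
    · rw [rowsChunks, dif_neg (by omega)]
      rw [Nat.div_eq_of_lt (by omega)]
      simp

-- the slice lista[i*ancho:(i+1)*ancho] is drop-then-take, for ancho > 0
theorem slice_chunk (lista : List Int) (ancho : Int) (hpos : 0 < ancho) (i : Nat) :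
    PySem.List.slice lista (some ((i : Int) * ancho)) (some (((i : Int) + 1) * ancho))
      = (lista.drop (i * ancho.toNat)).take ancho.toNat := by
  have h1 : ((i : Int) * ancho) = ((i * ancho.toNat : Nat) : Int) := by
    push_cast; rw [Int.toNat_of_nonneg (by omega)]
  have h2 : (((i : Int) + 1) * ancho) = ((i * ancho.toNat + ancho.toNat : Nat) : Int) := by
    push_cast; rw [Int.toNat_of_nonneg (by omega)]; ring
  rw [h1, h2, PySem.List.slice_natCast]
  congr 1
  omega

theorem auxiliar_eq_alt (lista : List Int) (ancho rv : Int) :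
    auxiliar lista ancho rv = auxiliar_alt lista ancho rv := by
  by_cases h : ancho ≤ 0
  · unfold auxiliar auxiliar_alt
    rw [if_pos h]
    exact foldA_noemit ancho rv h lista [] [] 0 (by omega)
  · have hpos : 0 < ancho := by omega
    unfold auxiliar auxiliar_alt
    rw [if_neg h]
    have hA := foldA_inv ancho rv hpos lista [] [] (by simpa using hpos)
    simp only [List.length_nil, Nat.cast_zero, List.nil_append] at hA
    rw [hA]
    rw [PySem.List.foldl_append_eq_flatMap, List.nil_append,
        rowsChunks_eq_map ancho.toNat (by omega) lista]
    have hs : ∀ i : Nat,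
        PySem.List.pyRepeat
          (PySem.List.slice lista (some ((i : Int) * ancho)) (some (((i : Int) + 1) * ancho))) rv
          = PySem.List.pyRepeat ((lista.drop (i * ancho.toNat)).take ancho.toNat) rv := by
      intro i; rw [slice_chunk lista ancho hpos i]
    simp only [hs, List.flatMap_map]

-- ===== VERDICT (by name: the statement is the Claim_ definition above) =====
theorem auxiliar_spec : Claim_equal_auxiliar := by
  intro lista ancho rv _
  unfold Spec_auxiliar
  exact auxiliar_eq_alt lista ancho rv
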